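-- pv_equiv track=rewrite | github.com/gpiero10/gpiero | Segundo Parcial/Parcial 3/parcial3.py | hay_tres_consecutivos
-- ===== SOURCE A (Python) =====
-- def hay_tres_consecutivos(marcacion:chr,columnas:list[list[chr]])->bool:
--     contador_consecutivo:int = 0
--     for columna in columnas:
--         for elemento in columna:
--             if marcacion == elemento:
--                 contador_consecutivo += 1
--             elif marcacion != elemento and contador_consecutivo < 3:
--                 contador_consecutivo = 0
--         if contador_consecutivo >= 3:
--             return True
--         else:
--             contador_consecutivo = 0
--     return False
-- ===== SOURCE B (Python) =====
-- def hay_tres_consecutivos(marcacion, columnas):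
--     # sliding 3-window over each column via zip of the column with its two shifts
--     return any(
--         a == b == c == marcacion
--         for columna in columnas
--         for a, b, c in zip(columna, columna[1:], columna[2:])
--     )
-- ===== Notes on version B (the rewrite author's own statement) =====
-- stated objective: idiomatic
-- what changed: Replaced the resettable-counter state machine (with its conditional reset and per-column counter check) by a stateless sliding 3-window: zip each column with its two shifted copies and ask any() whether some window is entirely the mark.
import Mathlib
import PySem

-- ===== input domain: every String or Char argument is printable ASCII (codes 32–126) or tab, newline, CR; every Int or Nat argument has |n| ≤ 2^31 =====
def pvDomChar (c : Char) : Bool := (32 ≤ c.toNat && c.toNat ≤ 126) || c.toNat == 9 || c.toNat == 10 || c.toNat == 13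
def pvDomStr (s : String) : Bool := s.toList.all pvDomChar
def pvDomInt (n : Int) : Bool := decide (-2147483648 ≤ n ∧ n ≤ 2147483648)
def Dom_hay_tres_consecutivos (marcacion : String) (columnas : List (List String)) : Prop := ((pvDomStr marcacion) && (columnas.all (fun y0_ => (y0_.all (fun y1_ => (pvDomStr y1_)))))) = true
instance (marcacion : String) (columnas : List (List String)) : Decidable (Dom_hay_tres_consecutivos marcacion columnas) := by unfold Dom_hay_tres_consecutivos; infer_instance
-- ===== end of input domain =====

-- B replaces A's resettable-counter scan by a stateless sliding 3-window (zip of each column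
-- with its two shifts); objective: idiomatic.


-- ===== PORT A =====
-- inner 'for elemento in columna' loop carrying contador_consecutivo
def pvColLoop (marcacion : String) (cnt : Int) : List String → Int
  | [] => cnt
  | elemento :: rest =>
      if marcacion == elemento then pvColLoop marcacion (cnt + 1) rest
      else if marcacion != elemento && decide (cnt < 3) then pvColLoop marcacion 0 rest
      else pvColLoop marcacion cnt rest

-- outer loop: after each column, return True if the counter is ≥ 3, else reset it to 0
def hay_tres_consecutivos (marcacion : String) (columnas : List (List String)) : Bool :=
  match columnas with
  | [] => false
  | columna :: rest =>
      if pvColLoop marcacion 0 columna ≥ 3 then true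
      else hay_tres_consecutivos marcacion rest

-- ===== PORT B =====
-- zip(columna, columna[1:], columna[2:]); the slices col[1:], col[2:] are List.drop 1 / 2
def pvZip3 {α : Type} : List α → List α → List α → List (α × α × α)
  | a :: as, b :: bs, c :: cs => (a, b, c) :: pvZip3 as bs cs
  | _, _, _ => []

def hay_tres_consecutivos_alt (marcacion : String) (columnas : List (List String)) : Bool :=
  columnas.any (fun columna =>
    (pvZip3 columna (columna.drop 1) (columna.drop 2)).any
      (fun t => t.1 == t.2.1 && t.2.1 == t.2.2 && t.2.2 == marcacion))

-- ===== PRECONDITION & SPEC =====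
def Spec_hay_tres_consecutivos (marcacion : String) (columnas : List (List String)) (out : Bool) : Prop := out = hay_tres_consecutivos_alt marcacion columnas
instance (marcacion : String) (columnas : List (List String)) (out : Bool) : Decidable (Spec_hay_tres_consecutivos marcacion columnas out) := by unfold Spec_hay_tres_consecutivos; infer_instance

-- ===== CLAIM (what is proved, stated in full; the proofs are below) =====
def Claim_equal_hay_tres_consecutivos : Prop := ∀ (marcacion : String) (columnas : List (List String)), Dom_hay_tres_consecutivos marcacion columnas → Spec_hay_tres_consecutivos marcacion columnas (hay_tres_consecutivos marcacion columnas)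

-- ===== LEMMAS AND PROOFS =====

-- B's per-column window test, named for the proofs
def pvWin (m : String) (l : List String) : Bool :=
  (pvZip3 l (l.drop 1) (l.drop 2)).any
    (fun t => t.1 == t.2.1 && t.2.1 == t.2.2 && t.2.2 == m)

-- first element equals the mark / first two elements equal the mark
def pvP1 (m : String) : List String → Bool
  | a :: _ => a == m
  | [] => false

def pvP2 (m : String) : List String → Bool
  | a :: b :: _ => a == m && b == m
  | _ => false

lemma pvWin_cons3 (m a b c : String) (t : List String) :
    pvWin m (a :: b :: c :: t) = ((a == b && b == c && c == m) || pvWin m (b :: c :: t)) := by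
  simp [pvWin, pvZip3]

lemma pvColLoop_ge (m : String) (l : List String) :
    ∀ cnt : Int, 3 ≤ cnt → 3 ≤ pvColLoop m cnt l := by
  induction l with
  | nil => intro cnt h; simpa [pvColLoop] using h
  | cons e rest ih =>
      intro cnt h
      simp only [pvColLoop]
      split_ifs with h1 h2
      · exact ih _ (by omega)
      · simp [bne] at h2; omega
      · exact ih _ h

-- step lemmas for A's inner loop
lemma pvColLoop_pos (m a : String) (h : m = a) (cnt : Int) (l : List String) :
    pvColLoop m cnt (a :: l) = pvColLoop m (cnt + 1) l := by
  subst h; simp [pvColLoop]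

lemma pvColLoop_neg (m a : String) (h : ¬ m = a) (cnt : Int) (hc : cnt < 3) (l : List String) :
    pvColLoop m cnt (a :: l) = pvColLoop m 0 l := by
  simp [pvColLoop, h, hc]

lemma pvKey (m : String) (l : List String) :
    (3 ≤ pvColLoop m 0 l ↔ pvWin m l = true) ∧
    (3 ≤ pvColLoop m 1 l ↔ (pvP2 m l || pvWin m l) = true) ∧
    (3 ≤ pvColLoop m 2 l ↔ (pvP1 m l || pvWin m l) = true) := by
  induction l with
  | nil =>
      refine ⟨?_, ?_, ?_⟩ <;> (simp [pvColLoop, pvWin, pvZip3, pvP1, pvP2]; try omega)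
  | cons a t ih =>
      obtain ⟨ih0, ih1, ih2⟩ := ih
      rcases t with _ | ⟨b, _ | ⟨c, t2⟩⟩
      · by_cases hma : m = a
        · subst hma
          refine ⟨?_, ?_, ?_⟩ <;> (simp [pvColLoop, pvWin, pvZip3, pvP1, pvP2]; try omega)
        · have hma' : ¬ a = m := fun h => hma h.symm
          refine ⟨?_, ?_, ?_⟩ <;>
            (simp [pvColLoop, pvWin, pvZip3, pvP1, pvP2, hma, hma']; try omega)
      · by_cases hma : m = a
        · subst hma
          by_cases hmb : m = b
          · subst hmb
            refine ⟨?_, ?_, ?_⟩ <;> (simp [pvColLoop, pvWin, pvZip3, pvP1, pvP2]; try omega)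
          · have hmb' : ¬ b = m := fun h => hmb h.symm
            refine ⟨?_, ?_, ?_⟩ <;>
              (simp [pvColLoop, pvWin, pvZip3, pvP1, pvP2, hmb, hmb']; try omega)
        · have hma' : ¬ a = m := fun h => hma h.symm
          by_cases hmb : m = b
          · subst hmb
            refine ⟨?_, ?_, ?_⟩ <;>
              (simp [pvColLoop, pvWin, pvZip3, pvP1, pvP2, hma, hma']; try omega)
          · have hmb' : ¬ b = m := fun h => hmb h.symm
            refine ⟨?_, ?_, ?_⟩ <;>
              (simp [pvColLoop, pvWin, pvZip3, pvP1, pvP2, hma, hma', hmb, hmb']; try omega)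
      · by_cases hma : m = a
        · subst hma
          refine ⟨?_, ?_, ?_⟩
          · have e1 : pvColLoop m 0 (m :: b :: c :: t2) = pvColLoop m 1 (b :: c :: t2) := by
              rw [pvColLoop_pos m m rfl 0]; norm_num
            rw [e1, ih1, pvWin_cons3]
            by_cases hb : m = b
            · subst hb
              by_cases hc : m = c
              · subst hc; simp [pvP2]
              · have hc' : ¬ c = m := fun h => hc h.symm
                simp [pvP2, hc, hc']
            · have hb' : ¬ b = m := fun h => hb h.symm
              simp [pvP2, hb, hb']
          · have e2 : pvColLoop m 1 (m :: b :: c :: t2) = pvColLoop m 2 (b :: c :: t2) := by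
              rw [pvColLoop_pos m m rfl 1]; norm_num
            rw [e2, ih2, pvWin_cons3]
            by_cases hb : m = b
            · subst hb
              by_cases hc : m = c
              · subst hc; simp [pvP1, pvP2]
              · simp [pvP1, pvP2]
            · have hb' : ¬ b = m := fun h => hb h.symm
              simp [pvP1, pvP2, hb, hb']
          · have e3 : pvColLoop m 2 (m :: b :: c :: t2) = pvColLoop m 3 (b :: c :: t2) := by
              rw [pvColLoop_pos m m rfl 2]; norm_num
            rw [e3]
            have h3 := pvColLoop_ge m (b :: c :: t2) 3 (by omega)
            simp [pvP1, h3]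
        · have hwin : pvWin m (a :: b :: c :: t2) = pvWin m (b :: c :: t2) := by
            have hfalse : (a == b && b == c && c == m) = false := by
              by_cases hab : a = b
              · by_cases hbc : b = c
                · by_cases hcm : c = m
                  · exact absurd (hab.trans (hbc.trans hcm)).symm hma
                  · simp [hcm]
                · simp [hbc]
              · simp [hab]
            rw [pvWin_cons3, hfalse, Bool.false_or]
          have hma' : ¬ a = m := fun h => hma h.symm
          refine ⟨?_, ?_, ?_⟩
          · rw [pvColLoop_neg m a hma 0 (by omega), ih0, hwin]
          · rw [pvColLoop_neg m a hma 1 (by omega), ih0, hwin]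
            simp [pvP2, hma']
          · rw [pvColLoop_neg m a hma 2 (by omega), ih0, hwin]
            simp [pvP1, hma']

lemma pvMain (m : String) (cols : List (List String)) :
    hay_tres_consecutivos m cols = hay_tres_consecutivos_alt m cols := by
  induction cols with
  | nil => rfl
  | cons c rest ih =>
      have hk := (pvKey m c).1
      have halt : hay_tres_consecutivos_alt m (c :: rest)
          = (pvWin m c || hay_tres_consecutivos_alt m rest) := rfl
      rw [halt]
      show (if pvColLoop m 0 c >= 3 then true else hay_tres_consecutivos m rest)
          = (pvWin m c || hay_tres_consecutivos_alt m rest)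
      by_cases h : 3 <= pvColLoop m 0 c
      · rw [if_pos h, hk.mp h]; rfl
      · have hw : pvWin m c = false := by
          cases hpv : pvWin m c
          · rfl
          · exact absurd (hk.mpr hpv) h
        rw [if_neg h, hw]
        simpa using ih

-- ===== VERDICT (by name: the statement is the Claim_ definition above) =====
theorem hay_tres_consecutivos_spec : Claim_equal_hay_tres_consecutivos := by
  intro m cols _
  exact pvMain m cols
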